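-- pv_equiv track=rewrite | github.com/j1sk1ss/CordellCompiler | src/lir/peephole/pattern_generator/src/parser.py | _safe_split
-- ===== SOURCE A (Python) =====
-- def _safe_split(source: str, dil: str = '/') -> list[str]:
--     buf: list = []
--     parts: list = []
--
--     for line in source.splitlines(keepends=True):
--         stripped = line.lstrip()
--         if stripped.startswith(";"):
--             continue
--
--         segments = line.split(dil)
--         buf.append(segments[0])
--
--         for seg in segments[1:]:
--             parts.append("".join(buf))
--             buf = [seg]
--
--     tail = "".join(buf).strip()
--     if tail:
--         parts.append(tail)
--
--     return parts
-- ===== SOURCE B (Python) =====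
-- def _safe_split(source: str, dil: str = '/') -> list[str]:
--     kept = [ln for ln in source.splitlines(keepends=True)
--             if not ln.lstrip().startswith(";")]
--     segments = "".join(kept).split(dil)
--     tail = segments[-1].strip()
--     return segments[:-1] + ([tail] if tail else [])
-- ===== Notes on version B (the rewrite author's own statement) =====
-- stated objective: simpler
-- what changed: A's incremental per-line split with a running buffer (append/flush/reset across lines) is replaced by filtering out comment lines, joining the rest, doing one whole-string split, and stripping only the final segment; Pre_ excludes an empty delimiter (ValueError in both) and multi-character delimiters containing a line-break character, where a delimiter occurrence may span a line boundary and the per-line and whole-text readings each are defensible.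
-- outside the precondition, e.g. on _safe_split('a\nb', '\nb'): A returns ['a\nb'], B returns ['a']
import Mathlib
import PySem

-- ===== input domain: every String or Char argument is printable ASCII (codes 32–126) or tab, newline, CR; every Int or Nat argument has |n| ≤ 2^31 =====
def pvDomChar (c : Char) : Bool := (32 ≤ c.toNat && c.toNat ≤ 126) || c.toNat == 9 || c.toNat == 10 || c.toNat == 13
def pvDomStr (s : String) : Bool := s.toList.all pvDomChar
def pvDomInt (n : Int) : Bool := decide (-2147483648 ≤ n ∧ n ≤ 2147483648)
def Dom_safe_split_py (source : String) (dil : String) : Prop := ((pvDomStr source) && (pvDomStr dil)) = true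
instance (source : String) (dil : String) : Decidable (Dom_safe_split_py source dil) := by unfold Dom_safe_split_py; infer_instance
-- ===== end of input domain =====

-- B replaces A's per-line buffered splitting (append/flush/reset of a running buffer across lines)
-- by one whole-text split of the joined non-comment lines, fixing up only the stripped tail (objective: simpler).

-- Shared helper: hand port of Python's str.splitlines(keepends=True) (PySem has only the
-- keepends=False form). Exact on the stated input domain (printable ASCII + tab/LF/CR),
-- where the only line breaks are "\n", "\r", "\r\n".
def pyLinesK : List Char → List (List Char)
  | [] => []
  | '\r' :: '\n' :: rest => ['\r', '\n'] :: pyLinesK rest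
  | '\r' :: rest => ['\r'] :: pyLinesK rest
  | '\n' :: rest => ['\n'] :: pyLinesK rest
  | c :: rest =>
    match pyLinesK rest with
    | [] => [[c]]
    | l :: ls => (c :: l) :: ls



-- ===== PORT A =====
def safe_split_py (source : String) (dil : String) : List String :=
  let lines := (pyLinesK source.toList).map (fun cs => String.ofList cs)
  let st :=
    lines.foldl (fun (st : List String × List String) line =>
      if PySem.Str.startswith (PySem.Str.lstrip line) ";" then st
      else
        match (PySem.Str.split? line dil).getD [] with
        | [] => st
        | s0 :: rest =>
          rest.foldl (fun (st : List String × List String) seg =>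
            ([seg], st.2 ++ [PySem.Str.join "" st.1]))
            (st.1 ++ [s0], st.2))
      ([], [])
  let tail := PySem.Str.strip (PySem.Str.join "" st.1)
  if tail ≠ "" then st.2 ++ [tail] else st.2

-- ===== PORT B =====
def safe_split_py_alt (source : String) (dil : String) : List String :=
  let kept := ((pyLinesK source.toList).map (fun cs => String.ofList cs)).filter
      (fun ln => !(PySem.Str.startswith (PySem.Str.lstrip ln) ";"))
  let segments := (PySem.Str.split? (PySem.Str.join "" kept) dil).getD []
  let tail := PySem.Str.strip ((segments.getLast?).getD "")
  segments.dropLast ++ (if tail ≠ "" then [tail] else [])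

-- ===== PRECONDITION & SPEC =====
-- Pre_ excludes an empty delimiter (there A raises ValueError, and B raises too) and
-- multi-character delimiters containing a line-break character: on those a delimiter occurrence
-- may span a line boundary, where A's per-line split and B's whole-text split are each a
-- defensible reading.
def Pre_safe_split_py (source : String) (dil : String) : Prop :=
  dil ≠ "" ∧ (dil.toList.length = 1 ∨ ('\n' ∉ dil.toList ∧ '\r' ∉ dil.toList))
instance (source : String) (dil : String) : Decidable (Pre_safe_split_py source dil) := by
  unfold Pre_safe_split_py; infer_instance
def pvWitness_safe_split_py : String × String := ("x/y\n; comment\nz ", "/")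

def Spec_safe_split_py (source : String) (dil : String) (out : List String) : Prop := out = safe_split_py_alt source dil
instance (source : String) (dil : String) (out : List String) : Decidable (Spec_safe_split_py source dil out) := by unfold Spec_safe_split_py; infer_instance

-- ===== CLAIM (what is proved, stated in full; the proofs are below) =====
def Claim_equal_safe_split_py : Prop := ∀ (source : String) (dil : String), Dom_safe_split_py source dil → Pre_safe_split_py source dil → Spec_safe_split_py source dil (safe_split_py source dil)

-- ===== LEMMAS AND PROOFS =====

def pvSplit (sep : List Char) : List Char → List (List Char)
  | [] => [[]]
  | c :: rest =>
    if sep.isPrefixOf (c :: rest) then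
      [] :: pvSplit sep (List.drop (sep.length - 1) rest)
    else
      match pvSplit sep rest with
      | [] => [[]]
      | l :: ls => (c :: l) :: ls
termination_by l => l.length
decreasing_by
  all_goals simp_all
  try omega

theorem pvSplit_ne_nil (sep l : List Char) : pvSplit sep l ≠ [] := by
  induction l using pvSplit.induct sep with
  | case1 => simp [pvSplit]
  | case2 c rest h ih => simp [pvSplit, h]
  | case3 c rest h hm ih => exact absurd hm ih
  | case4 c rest h l ls hm ih => simp [pvSplit, h, hm]

-- unfolding equations in usable form
theorem pvSplit_nil (sep : List Char) : pvSplit sep [] = [[]] := by simp [pvSplit]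

theorem pvSplit_cons_prefix (sep : List Char) (c : Char) (rest : List Char)
    (h : sep.isPrefixOf (c :: rest)) :
    pvSplit sep (c :: rest) = [] :: pvSplit sep (List.drop (sep.length - 1) rest) := by
  simp [pvSplit, h]

theorem pvSplit_cons_not_prefix (sep : List Char) (c : Char) (rest : List Char)
    (h : ¬ sep.isPrefixOf (c :: rest)) :
    pvSplit sep (c :: rest) = (pvSplit sep rest).modifyHead (c :: ·) := by
  rcases hm : pvSplit sep rest with _ | ⟨l, ls⟩
  · exact absurd hm (pvSplit_ne_nil sep rest)
  · simp [pvSplit, h, hm]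

-- GO lemma
theorem go_eq (sep : List Char) (hsep : sep ≠ []) :
    ∀ (fuel : Nat) (l cur : List Char) (acc : List (List Char)), l.length < fuel →
    PySem.Chars.splitOn.go sep fuel l cur acc =
      acc.reverse ++ (pvSplit sep l).modifyHead (cur.reverse ++ ·) := by
  intro fuel
  induction fuel with
  | zero => intro l cur acc h; omega
  | succ n ih =>
    intro l cur acc h
    cases l with
    | nil =>
      simp [PySem.Chars.splitOn.go, pvSplit_nil]
    | cons c rest =>
      by_cases hp : sep.isPrefixOf (c :: rest)
      · rw [show PySem.Chars.splitOn.go sep (n+1) (c::rest) cur acc =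
            PySem.Chars.splitOn.go sep n (List.drop sep.length (c::rest)) [] (cur.reverse :: acc) by
          simp [PySem.Chars.splitOn.go, hp]]
        rw [ih _ _ _ (by
          have hpos : 0 < sep.length := List.length_pos_iff.mpr hsep
          have h' := h
          simp only [List.length_drop, List.length_cons] at h' ⊢
          omega)]
        rw [pvSplit_cons_prefix sep c rest hp]
        have hd : List.drop sep.length (c :: rest) = List.drop (sep.length - 1) rest := by
          cases hk : sep.length with
          | zero => exact absurd (List.length_eq_zero_iff.mp hk) hsep
          | succ k => simp [List.drop_succ_cons]
        rw [hd]
        rcases hq : pvSplit sep (List.drop (sep.length - 1) rest) with _ | ⟨x, xs⟩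
        · exact absurd hq (pvSplit_ne_nil _ _)
        · simp
      · rw [show PySem.Chars.splitOn.go sep (n+1) (c::rest) cur acc =
            PySem.Chars.splitOn.go sep n rest (c :: cur) acc by
          simp [PySem.Chars.splitOn.go, hp]]
        rw [ih _ _ _ (by simp at h ⊢; omega)]
        rw [pvSplit_cons_not_prefix sep c rest hp]
        rcases hq : pvSplit sep rest with _ | ⟨x, xs⟩
        · exact absurd hq (pvSplit_ne_nil _ _)
        · simp

theorem splitOn_eq_pvSplit (sep : List Char) (hsep : sep ≠ []) (l : List Char) :
    PySem.Chars.splitOn l sep = pvSplit sep l := by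
  rw [PySem.Chars.splitOn, go_eq sep hsep _ _ _ _ (by omega)]
  rcases hq : pvSplit sep l with _ | ⟨x, xs⟩
  · exact absurd hq (pvSplit_ne_nil _ _)
  · simp

theorem join_nil_flatten (xs : List (List Char)) : PySem.Chars.join [] xs = xs.flatten := by
  induction xs with
  | nil => simp [PySem.Chars.join, List.intercalate]
  | cons a t ih =>
    cases t with
    | nil => simp [PySem.Chars.join, List.intercalate]
    | cons b t' =>
      simp only [PySem.Chars.join, List.intercalate, List.intersperse] at *
      simp_all

def pvNoOcc (sep b : List Char) : Prop := ∀ i, ¬ sep <+: b.drop i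

theorem pvSplit_single (sep b : List Char) (h : pvNoOcc sep b) : pvSplit sep b = [b] := by
  induction b with
  | nil => exact pvSplit_nil sep
  | cons c rest ih =>
    have hp : ¬ sep.isPrefixOf (c :: rest) := by
      intro hp
      exact h 0 (by simpa using List.isPrefixOf_iff_prefix.mp hp)
    rw [pvSplit_cons_not_prefix sep c rest hp, ih (fun i => by simpa using h (i+1))]
    rfl

theorem pvSplit_singleton_eq (sep p : List Char) : ∀ x, pvSplit sep p = [x] → x = p := by
  induction p using pvSplit.induct sep with
  | case1 => intro x h; rw [pvSplit_nil] at h; simpa using h.symm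
  | case2 c rest hp ih =>
    intro x h
    rw [pvSplit_cons_prefix sep c rest hp] at h
    simp at h
    exact absurd h.2 (pvSplit_ne_nil _ _)
  | case3 c rest hp hm ih => exact absurd hm (pvSplit_ne_nil _ _)
  | case4 c rest hp l ls hm ih =>
    intro x h
    rw [pvSplit_cons_not_prefix sep c rest hp, hm] at h
    simp at h
    rcases h with ⟨h1, h2⟩
    subst h2
    rw [← h1, ih l (by rw [hm])]

theorem getLast?_cons_ne {α : Type} (c : α) (rest : List α) (h : rest ≠ []) :
    (c :: rest).getLast? = rest.getLast? := by
  cases rest with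
  | nil => simp at h
  | cons a t => simp [List.getLast?_cons_cons]

theorem pvSplit_getLast (sep : List Char) (hsep : sep ≠ []) (p : List Char) :
    pvNoOcc sep ((pvSplit sep p).getLastD []) ∧
      ((pvSplit sep p).getLastD [] = [] ∨ ((pvSplit sep p).getLastD []).getLast? = p.getLast?) := by
  induction p using pvSplit.induct sep with
  | case1 =>
    rw [pvSplit_nil]
    exact ⟨fun i => by simpa [List.prefix_nil] using hsep, Or.inl rfl⟩
  | case2 c rest hp ih =>
    rw [pvSplit_cons_prefix sep c rest hp]
    have hne := pvSplit_ne_nil sep (List.drop (sep.length - 1) rest)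
    have hLD : ([] :: pvSplit sep (List.drop (sep.length - 1) rest)).getLastD [] =
        (pvSplit sep (List.drop (sep.length - 1) rest)).getLastD [] := by
      rw [List.getLastD_cons]
    rw [hLD]
    refine ⟨ih.1, ?_⟩
    rcases ih.2 with h | h
    · exact Or.inl h
    · by_cases hd : List.drop (sep.length - 1) rest = []
      · left
        rw [← List.getLast?_eq_none_iff]
        rw [h, hd]
        rfl
      · right
        rw [h, List.getLast?_drop, if_neg (by
          intro hle
          exact hd (List.drop_eq_nil_of_le hle))]
        have hrne : rest ≠ [] := by
          intro he; exact hd (by simp [he])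
        exact (getLast?_cons_ne c rest hrne).symm
  | case3 c rest hp hm ih => exact absurd hm (pvSplit_ne_nil _ _)
  | case4 c rest hp l ls hm ih =>
    rw [pvSplit_cons_not_prefix sep c rest hp, hm]
    rw [hm] at ih
    cases ls with
    | nil =>
      have hlr : l = rest := pvSplit_singleton_eq sep rest l hm
      subst hlr
      simp only [List.modifyHead, List.getLastD_cons, List.getLastD_nil] at *
      constructor
      · intro i
        cases i with
        | zero =>
          intro hpre
          exact hp (by simpa [List.isPrefixOf_iff_prefix] using hpre)
        | succ j =>
          simpa using ih.1 j
      · exact Or.inr (by first | rfl | trivial)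
    | cons q qs =>
      have hgl : ((c :: l) :: q :: qs).getLastD [] = (l :: q :: qs).getLastD [] := by
        simp [List.getLastD_cons]
      simp only [List.modifyHead]
      rw [hgl]
      refine ⟨ih.1, ?_⟩
      rcases ih.2 with h | h
      · exact Or.inl h
      · right
        rw [h]
        have hrne : rest ≠ [] := by
          intro he
          rw [he, pvSplit_nil] at hm
          simp at hm
        exact (getLast?_cons_ne c rest hrne).symm

def pvNoStraddle (sep a l : List Char) : Prop :=
  ∀ i, i < a.length → sep <+: (a ++ l).drop i → sep <+: a.drop i

theorem pvNoStraddle_drop (sep a l : List Char) (h : pvNoStraddle sep a l) (d : Nat)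
    (hd : d ≤ a.length) : pvNoStraddle sep (a.drop d) l := by
  intro i hi hpre
  have h2 : (a.drop d).drop i = a.drop (d + i) := by rw [List.drop_drop]
  rw [h2]
  apply h (d + i) (by simp only [List.length_drop] at hi; omega)
  rw [← List.drop_append_of_le_length hd, List.drop_drop] at hpre
  exact hpre

theorem prefix_append_of_length_le {α : Type} (sep x l : List α)
    (h : sep <+: x ++ l) (hle : sep.length ≤ x.length) : sep <+: x := by
  have h1 : sep = (x ++ l).take sep.length := (List.prefix_iff_eq_take.mp h)
  rw [List.take_append_of_le_length hle] at h1
  rw [h1]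
  exact List.take_prefix _ _

theorem pvNoStraddle_of (sep a l : List Char)
    (h2 : sep.length = 1 ∨ ('\n' ∉ sep ∧ '\r' ∉ sep))
    (ha : a = [] ∨ a.getLast? = some '\n' ∨ a.getLast? = some '\r') :
    pvNoStraddle sep a l := by
  intro i hi hpre
  by_cases hc : i + sep.length ≤ a.length
  · rw [List.drop_append_of_le_length (by omega)] at hpre
    exact prefix_append_of_length_le sep _ l hpre (by simp only [List.length_drop]; omega)
  · -- the occurrence would cover a's last character
    have hane : a ≠ [] := by intro he; subst he; simp at hi
    rcases ha with he | ha
    · exact absurd he hane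
    obtain ⟨t, ht⟩ := hpre
    have hj : a.length - 1 - i < sep.length := by omega
    have hlast? : (a ++ l)[a.length - 1]? = some (a.getLast hane) := by
      rw [List.getElem?_append_left (by omega), List.getLast_eq_getElem,
        List.getElem?_eq_getElem (by omega)]
    have hsepj : sep[a.length - 1 - i]? = some (a.getLast hane) := by
      rw [← List.getElem?_append_left (l₂ := t) hj, ht, List.getElem?_drop,
        show i + (a.length - 1 - i) = a.length - 1 by omega, hlast?]
    rcases h2 with h1 | hnb
    · -- sep has length 1: the match starting at i = a.length - 1 lies inside a
      have hi' : i = a.length - 1 := by omega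
      rcases sep with _ | ⟨s0, srest⟩
      · simp at h1
      · have hs : srest = [] := by simpa using h1
        subst hs
        have hz : a.length - 1 - i = 0 := by omega
        rw [hz] at hsepj
        have hs0 : s0 = a.getLast hane := by simpa using hsepj
        rw [hi', hs0, List.drop_length_sub_one hane]
    · -- sep contains no line break, but the occurrence covers a's last char, which is one
      exfalso
      have hmem : a.getLast hane ∈ sep := List.mem_of_getElem? hsepj
      have hlg : a.getLast? = some (a.getLast hane) := List.getLast?_eq_some_getLast hane
      rcases ha with hnl | hcr
      · rw [hlg] at hnl; simp at hnl; rw [hnl] at hmem; exact hnb.1 hmem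
      · rw [hlg] at hcr; simp at hcr; rw [hcr] at hmem; exact hnb.2 hmem

theorem pvSplit_glue (sep : List Char) (hsep : sep ≠ []) (a l : List Char)
    (hns : pvNoStraddle sep a l) (x : List Char) (xs : List (List Char))
    (hl : pvSplit sep l = x :: xs) :
    pvSplit sep (a ++ l) =
      (pvSplit sep a).dropLast ++ ((pvSplit sep a).getLastD [] ++ x) :: xs := by
  induction a using pvSplit.induct sep with
  | case1 => simp [pvSplit_nil, hl]
  | case2 c rest hp ih =>
    have hk : 0 < sep.length := List.length_pos_iff.mpr hsep
    have hkle : sep.length ≤ rest.length + 1 := by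
      simpa using (List.isPrefixOf_iff_prefix.mp hp).length_le
    have hp' : sep.isPrefixOf (c :: (rest ++ l)) := by
      rw [List.isPrefixOf_iff_prefix] at hp ⊢
      exact hp.trans (by simpa using List.prefix_append (c :: rest) l)
    rw [show c :: rest ++ l = c :: (rest ++ l) from rfl, pvSplit_cons_prefix sep c _ hp',
      pvSplit_cons_prefix sep c rest hp]
    have hdrop : List.drop (sep.length - 1) (rest ++ l) = List.drop (sep.length - 1) rest ++ l :=
      List.drop_append_of_le_length (by omega)
    have hns' : pvNoStraddle sep (List.drop (sep.length - 1) rest) l := by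
      have hd := pvNoStraddle_drop sep (c :: rest) l hns sep.length (by simpa using hkle)
      obtain ⟨k, hk2⟩ : ∃ k, sep.length = k + 1 := ⟨sep.length - 1, by omega⟩
      rw [hk2] at hd
      rw [hk2]
      simpa [List.drop_succ_cons] using hd
    rw [hdrop, ih hns']
    have hTne := pvSplit_ne_nil sep (List.drop (sep.length - 1) rest)
    rcases hT : pvSplit sep (List.drop (sep.length - 1) rest) with _ | ⟨t0, ts⟩
    · exact absurd hT hTne
    · simp [List.getLastD_cons]
  | case3 c rest hp hm ih => exact absurd hm (pvSplit_ne_nil _ _)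
  | case4 c rest hp l0 ls hm ih =>
    have hpl : ¬ sep.isPrefixOf (c :: (rest ++ l)) := by
      intro hcontra
      apply hp
      rw [List.isPrefixOf_iff_prefix] at hcontra ⊢
      have := hns 0 (by simp) (by simpa using hcontra)
      simpa using this
    have hns' : pvNoStraddle sep rest l := by
      have := pvNoStraddle_drop sep (c :: rest) l hns 1 (by simp)
      simpa using this
    rw [show c :: rest ++ l = c :: (rest ++ l) from rfl,
      pvSplit_cons_not_prefix sep c _ hpl, ih hns',
      pvSplit_cons_not_prefix sep c rest hp, hm]
    cases ls with
    | nil => simp [List.getLastD_cons]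
    | cons q qs => simp [List.getLastD_cons]

theorem pyLinesK_r_eq (rest : List Char) (h : ∀ t, rest = '\n' :: t → False) :
    pyLinesK ('\r' :: rest) = ['\r'] :: pyLinesK rest := by
  cases rest with
  | nil => rfl
  | cons b t =>
    by_cases hb : b = '\n'
    · exact (h t (by rw [hb])).elim
    · simp [pyLinesK, hb]

theorem pyLinesK_ne_nil (s : List Char) : ∀ l ∈ pyLinesK s, l ≠ [] := by
  induction s using pyLinesK.induct with
  | case1 => simp [pyLinesK]
  | case2 rest ih => simp [pyLinesK]; exact fun l hl => ih l hl
  | case3 rest h ih => rw [pyLinesK_r_eq rest h]; simp; exact fun l hl => ih l hl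
  | case4 rest ih => simp [pyLinesK]; exact fun l hl => ih l hl
  | case5 c rest h1 h2 h3 hm ih => simp [pyLinesK, h2, h3, hm]
  | case6 c rest h1 h2 h3 l ls hm ih =>
    rw [show pyLinesK (c :: rest) = (c :: l) :: ls by simp [pyLinesK, h2, h3, hm]]
    intro x hx
    rcases List.mem_cons.mp hx with hx | hx
    · simp [hx]
    · exact ih x (by rw [hm]; exact List.mem_cons_of_mem _ hx)

theorem pyLinesK_dropLast_break (s : List Char) :
    ∀ l ∈ (pyLinesK s).dropLast, l.getLast? = some '\n' ∨ l.getLast? = some '\r' := by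
  induction s using pyLinesK.induct with
  | case1 => simp [pyLinesK]
  | case2 rest ih =>
    rw [show pyLinesK ('\r' :: '\n' :: rest) = ['\r','\n'] :: pyLinesK rest from rfl]
    intro l hl
    cases hpl : pyLinesK rest with
    | nil => rw [hpl] at hl; simp at hl
    | cons p ps =>
      rw [hpl] at hl
      rw [List.dropLast_cons_of_ne_nil (by simp)] at hl
      rcases List.mem_cons.mp hl with hl | hl
      · left; simp [hl]
      · exact ih l (by rw [hpl]; exact hl)
  | case3 rest h ih =>
    rw [pyLinesK_r_eq rest h]
    intro l hl
    cases hpl : pyLinesK rest with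
    | nil => rw [hpl] at hl; simp at hl
    | cons p ps =>
      rw [hpl] at hl
      rw [List.dropLast_cons_of_ne_nil (by simp)] at hl
      rcases List.mem_cons.mp hl with hl | hl
      · right; simp [hl]
      · exact ih l (by rw [hpl]; exact hl)
  | case4 rest ih =>
    rw [show pyLinesK ('\n' :: rest) = ['\n'] :: pyLinesK rest from rfl]
    intro l hl
    cases hpl : pyLinesK rest with
    | nil => rw [hpl] at hl; simp at hl
    | cons p ps =>
      rw [hpl] at hl
      rw [List.dropLast_cons_of_ne_nil (by simp)] at hl
      rcases List.mem_cons.mp hl with hl | hl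
      · left; simp [hl]
      · exact ih l (by rw [hpl]; exact hl)
  | case5 c rest h1 h2 h3 hm ih =>
    rw [show pyLinesK (c :: rest) = [[c]] by simp [pyLinesK, h2, h3, hm]]
    simp
  | case6 c rest h1 h2 h3 l ls hm ih =>
    rw [show pyLinesK (c :: rest) = (c :: l) :: ls by simp [pyLinesK, h2, h3, hm]]
    rw [hm] at ih
    intro x hx
    cases ls with
    | nil => simp at hx
    | cons q qs =>
      rw [List.dropLast_cons_of_ne_nil (by simp)] at hx
      rcases List.mem_cons.mp hx with hx | hx
      · -- x = c :: l, and l is a non-last line of rest's lines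
        have hlb := ih l (by rw [List.dropLast_cons_of_ne_nil (by simp)]; exact List.mem_cons_self)
        have hlne : l ≠ [] := pyLinesK_ne_nil rest l (by rw [hm]; exact List.mem_cons_self)
        rw [hx, getLast?_cons_ne c l hlne]
        exact hlb
      · exact ih x (by rw [List.dropLast_cons_of_ne_nil (by simp)]; exact List.mem_cons_of_mem _ hx)

theorem dropLast_filter_subset {α : Type} (P : α → Bool) (ls : List α) :
    ∀ x ∈ (ls.filter P).dropLast, x ∈ ls.dropLast := by
  induction ls using List.reverseRecOn with
  | nil => simp
  | append_singleton as y ih =>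
    intro x hx
    rw [List.filter_append, List.dropLast_concat] at *
    by_cases hy : P y
    · have hfy : List.filter P [y] = [y] := by simp [hy]
      rw [hfy, List.dropLast_concat] at hx
      exact List.mem_of_mem_filter hx
    · have hfy : List.filter P [y] = [] := by simp [hy]
      rw [hfy, List.append_nil] at hx
      exact List.mem_of_mem_filter (List.mem_of_mem_dropLast hx)

theorem getLastD_append_ne {α : Type} (u v : List α) (d : α) (h : v ≠ []) :
    (u ++ v).getLastD d = v.getLastD d := by
  rw [List.getLastD_eq_getLast?, List.getLastD_eq_getLast?, List.getLast?_append]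
  rcases hq : v.getLast? with _ | g
  · exact absurd (List.getLast?_eq_none_iff.mp hq) h
  · rfl

def pvBody (sep : List Char) (st : List Char × List (List Char)) (line : List Char) :
    List Char × List (List Char) :=
  match pvSplit sep line with
  | [] => st
  | s0 :: [] => (st.1 ++ s0, st.2)
  | s0 :: r0 :: r' => ((r0 :: r').getLastD [], st.2 ++ (st.1 ++ s0) :: (r0 :: r').dropLast)

theorem pvBody_eq (sep : List Char) (hsep : sep ≠ [])
    (h2 : sep.length = 1 ∨ ('\n' ∉ sep ∧ '\r' ∉ sep))
    (b : List Char) (parts : List (List Char)) (l : List Char)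
    (hN : pvNoOcc sep b) (hb : b = [] ∨ b.getLast? = some '\n' ∨ b.getLast? = some '\r') :
    pvBody sep (b, parts) l =
      ((pvSplit sep (b ++ l)).getLastD [], parts ++ (pvSplit sep (b ++ l)).dropLast) := by
  rcases hl : pvSplit sep l with _ | ⟨s0, rest⟩
  · exact absurd hl (pvSplit_ne_nil _ _)
  have hT : pvSplit sep (b ++ l) = (b ++ s0) :: rest := by
    rw [pvSplit_glue sep hsep b l (pvNoStraddle_of sep b l h2 hb) s0 rest hl,
      pvSplit_single sep b hN]
    simp [List.getLastD_cons]
  rw [hT]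
  cases rest with
  | nil => simp [pvBody, hl, List.getLastD_cons]
  | cons r0 r' =>
    simp only [pvBody, hl]
    simp [List.getLastD_cons]

theorem pvFold_inv (sep : List Char) (hsep : sep ≠ [])
    (h2 : sep.length = 1 ∨ ('\n' ∉ sep ∧ '\r' ∉ sep)) :
    ∀ (ls : List (List Char)) (b : List Char) (parts : List (List Char)),
    pvNoOcc sep b → (b = [] ∨ b.getLast? = some '\n' ∨ b.getLast? = some '\r') →
    (∀ l ∈ ls.dropLast, l.getLast? = some '\n' ∨ l.getLast? = some '\r') →
    ls.foldl (pvBody sep) (b, parts) =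
      ((pvSplit sep (b ++ ls.flatten)).getLastD [],
        parts ++ (pvSplit sep (b ++ ls.flatten)).dropLast) := by
  intro ls
  induction ls with
  | nil =>
    intro b parts hN hb hbr
    simp [pvSplit_single sep b hN, List.getLastD_cons]
  | cons l ls' ih =>
    intro b parts hN hb hbr
    rw [List.foldl_cons, pvBody_eq sep hsep h2 b parts l hN hb]
    cases ls' with
    | nil => simp
    | cons q qs =>
      have hlbr : l.getLast? = some '\n' ∨ l.getLast? = some '\r' := by
        apply hbr
        rw [List.dropLast_cons_of_ne_nil (by simp)]
        exact List.mem_cons_self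
      have hlne : l ≠ [] := by
        intro he; subst he; simp at hlbr
      -- properties of the new buffer
      have hG := pvSplit_getLast sep hsep (b ++ l)
      have hb' : (pvSplit sep (b ++ l)).getLastD [] = [] ∨
          ((pvSplit sep (b ++ l)).getLastD []).getLast? = some '\n' ∨
          ((pvSplit sep (b ++ l)).getLastD []).getLast? = some '\r' := by
        rcases hG.2 with h | h
        · exact Or.inl h
        · right
          rw [h, List.getLast?_append]
          rcases hlbr with hx | hx
          · left; rw [hx]; rfl
          · right; rw [hx]; rfl
      rw [ih _ _ hG.1 hb' (fun x hx => hbr x (by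
        rw [List.dropLast_cons_of_ne_nil (by simp)]
        exact List.mem_cons_of_mem _ hx))]
      -- glue the two splits together
      rcases hF' : pvSplit sep ((q :: qs).flatten) with _ | ⟨x, xs⟩
      · exact absurd hF' (pvSplit_ne_nil _ _)
      have hns1 : pvNoStraddle sep (b ++ l) ((q :: qs).flatten) := by
        apply pvNoStraddle_of sep _ _ h2
        right
        rw [List.getLast?_append]
        rcases hlbr with hx | hx
        · left; rw [hx]; rfl
        · right; rw [hx]; rfl
      have hFeq : pvSplit sep (b ++ (l :: q :: qs).flatten) =
          (pvSplit sep (b ++ l)).dropLast ++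
            pvSplit sep ((pvSplit sep (b ++ l)).getLastD [] ++ (q :: qs).flatten) := by
        rw [show b ++ (l :: q :: qs).flatten = (b ++ l) ++ (q :: qs).flatten by simp [List.flatten_cons]]
        rw [pvSplit_glue sep hsep _ _ hns1 x xs hF']
        rw [pvSplit_glue sep hsep _ _ (pvNoStraddle_of sep _ _ h2 hb') x xs hF',
          pvSplit_single sep _ hG.1]
        simp [List.getLastD_cons]
      rw [hFeq]
      have hne2 : pvSplit sep ((pvSplit sep (b ++ l)).getLastD [] ++ (q :: qs).flatten) ≠ [] :=
        pvSplit_ne_nil _ _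
      rw [getLastD_append_ne _ _ _ hne2, List.dropLast_append_of_ne_nil hne2]
      simp

def pvStepA (sep : List Char) (st : List (List Char) × List (List Char)) (line : List Char) :
    List (List Char) × List (List Char) :=
  if PySem.Chars.startswith (PySem.Chars.lstrip line) [';'] then st
  else
    match (PySem.Chars.split? line sep).getD [] with
    | [] => st
    | s0 :: rest =>
      rest.foldl (fun st seg => ([seg], st.2 ++ [PySem.Chars.join [] st.1])) (st.1 ++ [s0], st.2)

theorem chars_split?_eq (s sep : List Char) (h : sep ≠ []) :
    PySem.Chars.split? s sep = some (PySem.Chars.splitOn s sep) := by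
  simp [PySem.Chars.split?, h]

theorem inner_fold_eq : ∀ (rest : List (List Char)) (r0 : List Char)
    (buf : List (List Char)) (parts : List (List Char)),
    (r0 :: rest).foldl (fun st seg => ([seg], st.2 ++ [PySem.Chars.join [] st.1])) (buf, parts) =
      ([(r0 :: rest).getLastD []], parts ++ [buf.flatten] ++ (r0 :: rest).dropLast) := by
  intro rest
  induction rest with
  | nil =>
    intro r0 buf parts
    simp [join_nil_flatten, List.getLastD_cons]
  | cons r1 r'' ih =>
    intro r0 buf parts
    rw [List.foldl_cons]
    show List.foldl _ ([r0], parts ++ [PySem.Chars.join [] buf]) (r1 :: r'') = _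
    rw [ih r1 [r0] (parts ++ [PySem.Chars.join [] buf])]
    simp [join_nil_flatten, List.getLastD_cons]

theorem stepA_flatten (sep : List Char) (hsep : sep ≠ [])
    (st : List (List Char) × List (List Char)) (line : List Char) :
    (((pvStepA sep st line).1.flatten, (pvStepA sep st line).2) : List Char × List (List Char)) =
      (if PySem.Chars.startswith (PySem.Chars.lstrip line) [';'] then (st.1.flatten, st.2)
        else pvBody sep (st.1.flatten, st.2) line) := by
  by_cases hc : PySem.Chars.startswith (PySem.Chars.lstrip line) [';']
  · simp [pvStepA, hc]
  · rcases hl : pvSplit sep line with _ | ⟨s0, rest⟩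
    · exact absurd hl (pvSplit_ne_nil _ _)
    have hu : pvStepA sep st line =
        rest.foldl (fun st seg => ([seg], st.2 ++ [PySem.Chars.join [] st.1]))
          (st.1 ++ [s0], st.2) := by
      simp [pvStepA, hc, chars_split?_eq line sep hsep, splitOn_eq_pvSplit sep hsep line, hl]
    rw [hu]
    simp only [hc, if_false]
    cases rest with
    | nil => simp [pvBody, hl]
    | cons r0 r' =>
      rw [inner_fold_eq r' r0 (st.1 ++ [s0]) st.2]
      simp [pvBody, hl, List.getLastD_cons]

theorem foldA_flatten (sep : List Char) (hsep : sep ≠ []) :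
    ∀ (ls : List (List Char)) (buf parts : List (List Char)),
    (((ls.foldl (pvStepA sep) (buf, parts)).1.flatten,
      (ls.foldl (pvStepA sep) (buf, parts)).2) : List Char × List (List Char)) =
      ls.foldl (fun st l => if PySem.Chars.startswith (PySem.Chars.lstrip l) [';'] then st
        else pvBody sep st l) (buf.flatten, parts) := by
  intro ls
  induction ls with
  | nil => intro buf parts; rfl
  | cons l ls' ih =>
    intro buf parts
    rw [List.foldl_cons, List.foldl_cons]
    have hst := stepA_flatten sep hsep (buf, parts) l
    rcases hq : pvStepA sep (buf, parts) l with ⟨buf', parts'⟩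
    rw [hq] at hst
    simp only at hst
    rw [ih buf' parts', hst]

-- chars-level equivalence of the two programs
theorem pvMainChars (sep : List Char) (hsep : sep ≠ [])
    (h2 : sep.length = 1 ∨ ('\n' ∉ sep ∧ '\r' ∉ sep)) (s : List Char) :
    (let st := (pyLinesK s).foldl (pvStepA sep) ([], []);
     let tail := PySem.Chars.strip (PySem.Chars.join [] st.1);
     if tail ≠ [] then st.2 ++ [tail] else st.2) =
    (let kept := (pyLinesK s).filter
        (fun l => !(PySem.Chars.startswith (PySem.Chars.lstrip l) [';']));
     let segs := PySem.Chars.splitOn (PySem.Chars.join [] kept) sep;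
     let tail := PySem.Chars.strip (segs.getLast?.getD []);
     segs.dropLast ++ (if tail ≠ [] then [tail] else [])) := by
  simp only
  have hfold := foldA_flatten sep hsep (pyLinesK s) [] []
  set st := (pyLinesK s).foldl (pvStepA sep) (([] : List (List Char)), ([] : List (List Char))) with hst
  set kept := (pyLinesK s).filter
      (fun l => !(PySem.Chars.startswith (PySem.Chars.lstrip l) [';'])) with hkept
  have hfilter : (pyLinesK s).foldl (fun st l =>
      if PySem.Chars.startswith (PySem.Chars.lstrip l) [';'] then st else pvBody sep st l)
      (([] : List (List Char)).flatten, ([] : List (List Char))) =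
      kept.foldl (pvBody sep) ([], []) := by
    rw [hkept, List.foldl_filter]
    congr 1
    funext st l
    by_cases hc : PySem.Chars.startswith (PySem.Chars.lstrip l) [';'] <;> simp [hc]
  have hinv := pvFold_inv sep hsep h2 kept [] []
    (fun i => by simpa [List.prefix_nil] using hsep) (Or.inl rfl)
    (fun l hl => pyLinesK_dropLast_break s l (dropLast_filter_subset _ _ l hl))
  rw [hfilter, hinv] at hfold
  simp only [List.nil_append] at hfold
  have h1 : st.1.flatten = (pvSplit sep kept.flatten).getLastD [] := congrArg Prod.fst hfold
  have h2' : st.2 = (pvSplit sep kept.flatten).dropLast := congrArg Prod.snd hfold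
  rw [join_nil_flatten, h1, h2', join_nil_flatten, splitOn_eq_pvSplit sep hsep,
    ← List.getLastD_eq_getLast?]
  rw [List.getLastD_eq_getLast?]
  split_ifs with hx <;> simp_all

theorem semicolon_toList : (";" : String).toList = [';'] := rfl

theorem comment_bridge (line : String) :
    PySem.Str.startswith (PySem.Str.lstrip line) ";" =
      PySem.Chars.startswith (PySem.Chars.lstrip line.toList) [';'] := by
  rw [PySem.Str.startswith_eq, PySem.Str.toList_lstrip, semicolon_toList]

theorem split_bridge (line dil : String) (hd : dil.toList ≠ []) :
    ∃ segs, PySem.Str.split? line dil = some segs ∧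
      segs.map String.toList = PySem.Chars.splitOn line.toList dil.toList := by
  have h := PySem.Str.split?_map line dil
  rw [chars_split?_eq _ _ hd] at h
  rcases hq : PySem.Str.split? line dil with _ | segs
  · rw [hq] at h; simp at h
  · rw [hq] at h
    simp only [Option.map_some, Option.some.injEq] at h
    exact ⟨segs, rfl, h⟩

theorem innerStr_toList (rest : List String) : ∀ (buf parts : List String),
    (fun r => ((r.1.map String.toList, r.2.map String.toList) : List (List Char) × List (List Char)))
      (rest.foldl (fun (st : List String × List String) seg =>
        ([seg], st.2 ++ [PySem.Str.join "" st.1])) (buf, parts)) =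
    (rest.map String.toList).foldl
      (fun st seg => ([seg], st.2 ++ [PySem.Chars.join [] st.1]))
      (buf.map String.toList, parts.map String.toList) := by
  induction rest with
  | nil => intro buf parts; rfl
  | cons r0 rs ih =>
    intro buf parts
    rw [List.map_cons, List.foldl_cons, List.foldl_cons]
    have := ih [r0] (parts ++ [PySem.Str.join "" buf])
    simp only at this ⊢
    rw [this]
    simp [PySem.Str.toList_join]

theorem stepStr_toList (dil : String) (hd : dil.toList ≠ []) (st : List String × List String)
    (cs : List Char) :
    (fun r => ((r.1.map String.toList, r.2.map String.toList) : List (List Char) × List (List Char)))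
      ((fun (st : List String × List String) line =>
        if PySem.Str.startswith (PySem.Str.lstrip line) ";" then st
        else
          match (PySem.Str.split? line dil).getD [] with
          | [] => st
          | s0 :: rest =>
            rest.foldl (fun (st : List String × List String) seg =>
              ([seg], st.2 ++ [PySem.Str.join "" st.1]))
              (st.1 ++ [s0], st.2)) st (String.ofList cs)) =
      pvStepA dil.toList (st.1.map String.toList, st.2.map String.toList) cs := by
  by_cases hc : PySem.Chars.startswith (PySem.Chars.lstrip cs) [';']
  · simp [comment_bridge, String.toList_ofList, hc, pvStepA]
  · obtain ⟨segs, hs1, hs2⟩ := split_bridge (String.ofList cs) dil hd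
    rw [String.toList_ofList] at hs2
    simp only [comment_bridge, String.toList_ofList, hc, if_false, Bool.false_eq_true,
      pvStepA, hs1, Option.getD_some, chars_split?_eq _ _ hd]
    rcases segs with _ | ⟨s0, rest⟩
    · exfalso
      have hz : PySem.Chars.splitOn cs dil.toList = [] := by simpa using hs2.symm
      rw [splitOn_eq_pvSplit _ hd] at hz
      exact pvSplit_ne_nil _ _ hz
    · rw [← hs2]
      simp only [List.map_cons]
      have := innerStr_toList rest (st.1 ++ [s0]) st.2
      simp only at this ⊢
      rw [this]
      simp

theorem foldStr_toList (dil : String) (hd : dil.toList ≠ []) :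
    ∀ (csl : List (List Char)) (buf parts : List String),
    (fun r => ((r.1.map String.toList, r.2.map String.toList) : List (List Char) × List (List Char)))
      ((csl.map (fun cs => String.ofList cs)).foldl
        (fun (st : List String × List String) line =>
          if PySem.Str.startswith (PySem.Str.lstrip line) ";" then st
          else
            match (PySem.Str.split? line dil).getD [] with
            | [] => st
            | s0 :: rest =>
              rest.foldl (fun (st : List String × List String) seg =>
                ([seg], st.2 ++ [PySem.Str.join "" st.1]))
                (st.1 ++ [s0], st.2)) (buf, parts)) =
      csl.foldl (pvStepA dil.toList) (buf.map String.toList, parts.map String.toList) := by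
  intro csl
  induction csl with
  | nil => intro buf parts; rfl
  | cons cs csl' ih =>
    intro buf parts
    rw [List.map_cons, List.foldl_cons, List.foldl_cons]
    have hstep := stepStr_toList dil hd (buf, parts) cs
    simp only at hstep ⊢
    rcases hq : (if PySem.Str.startswith (PySem.Str.lstrip (String.ofList cs)) ";" = true then
          ((buf, parts) : List String × List String)
        else
          match (PySem.Str.split? (String.ofList cs) dil).getD [] with
          | [] => (buf, parts)
          | s0 :: rest =>
            List.foldl (fun (st : List String × List String) seg =>
              ([seg], st.2 ++ [PySem.Str.join "" st.1])) (buf ++ [s0], parts) rest)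
      with ⟨buf', parts'⟩
    rw [hq] at hstep
    have := ih buf' parts'
    simp only at this
    rw [this, hstep]

theorem toList_map_inj (a b : List String) (h : a.map String.toList = b.map String.toList) :
    a = b := by
  have hinj : Function.Injective String.toList := fun x y hxy => String.toList_inj.mp hxy
  exact List.map_injective_iff.mpr hinj h

theorem empty_toList : ("" : String).toList = [] := rfl

theorem ports_agree (source dil : String) (hne : dil ≠ "")
    (h2 : dil.toList.length = 1 ∨ ('\n' ∉ dil.toList ∧ '\r' ∉ dil.toList)) :
    safe_split_py source dil = safe_split_py_alt source dil := by
  have hd : dil.toList ≠ [] := fun h => hne (String.toList_eq_nil_iff.mp h)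
  apply toList_map_inj
  -- A side
  have hfold := foldStr_toList dil hd (pyLinesK source.toList) [] []
  simp only at hfold
  rcases hq : (((pyLinesK source.toList).map (fun cs => String.ofList cs)).foldl
      (fun (st : List String × List String) line =>
        if PySem.Str.startswith (PySem.Str.lstrip line) ";" then st
        else
          match (PySem.Str.split? line dil).getD [] with
          | [] => st
          | s0 :: rest =>
            rest.foldl (fun (st : List String × List String) seg =>
              ([seg], st.2 ++ [PySem.Str.join "" st.1]))
              (st.1 ++ [s0], st.2)) ([], [])) with ⟨bufA, partsA⟩
  rw [hq] at hfold
  simp only [List.map_nil] at hfold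
  have hA : (safe_split_py source dil).map String.toList =
      (let st := (pyLinesK source.toList).foldl (pvStepA dil.toList) ([], []);
       let tail := PySem.Chars.strip (PySem.Chars.join [] st.1);
       if tail ≠ [] then st.2 ++ [tail] else st.2) := by
    rw [safe_split_py]
    simp only [hq, ← hfold]
    have htl : (PySem.Str.strip (PySem.Str.join "" bufA)).toList =
        PySem.Chars.strip (PySem.Chars.join [] (bufA.map String.toList)) := by
      rw [PySem.Str.toList_strip, PySem.Str.toList_join, empty_toList]
    by_cases hcond : PySem.Str.strip (PySem.Str.join "" bufA) = ""
    · have hc2 : ¬ PySem.Chars.strip (PySem.Chars.join [] (bufA.map String.toList)) ≠ [] := by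
        rw [← htl]
        simp only [ne_eq, String.toList_eq_nil_iff, not_not]
        exact hcond
      rw [if_neg (by simp [hcond]), if_neg hc2]
    · have hc2 : PySem.Chars.strip (PySem.Chars.join [] (bufA.map String.toList)) ≠ [] := by
        rw [← htl]
        simp only [ne_eq, String.toList_eq_nil_iff]
        exact hcond
      rw [if_pos hcond, if_pos hc2]
      simp [htl]
  -- B side
  obtain ⟨segs, hs1, hs2⟩ := split_bridge
    (PySem.Str.join "" (((pyLinesK source.toList).map (fun cs => String.ofList cs)).filter
      (fun ln => !(PySem.Str.startswith (PySem.Str.lstrip ln) ";")))) dil hd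
  have hkept : (((pyLinesK source.toList).map (fun cs => String.ofList cs)).filter
      (fun ln => !(PySem.Str.startswith (PySem.Str.lstrip ln) ";"))).map String.toList =
      (pyLinesK source.toList).filter
        (fun l => !(PySem.Chars.startswith (PySem.Chars.lstrip l) [';'])) := by
    rw [List.filter_map]
    rw [List.map_map]
    have hcomp : (String.toList ∘ fun cs => String.ofList cs) = id := by
      funext cs; simp
    have hpred : ((fun ln => !(PySem.Str.startswith (PySem.Str.lstrip ln) ";")) ∘
        (fun cs => String.ofList cs)) =
        (fun l => !(PySem.Chars.startswith (PySem.Chars.lstrip l) [';'])) := by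
      funext cs
      simp [comment_bridge]
    rw [hpred, hcomp, List.map_id]
  rw [PySem.Str.toList_join, empty_toList, hkept] at hs2
  have hB : (safe_split_py_alt source dil).map String.toList =
      (let kept := (pyLinesK source.toList).filter
          (fun l => !(PySem.Chars.startswith (PySem.Chars.lstrip l) [';']));
       let csegs := PySem.Chars.splitOn (PySem.Chars.join [] kept) dil.toList;
       let tail := PySem.Chars.strip (csegs.getLast?.getD []);
       csegs.dropLast ++ (if tail ≠ [] then [tail] else [])) := by
    rw [safe_split_py_alt]
    simp only [hs1, Option.getD_some, ← hs2]
    have hlast : (segs.getLast?.getD "").toList = (segs.map String.toList).getLast?.getD [] := by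
      rw [List.getLast?_map]
      rcases segs.getLast? with _ | x <;> simp [empty_toList]
    have htl : (PySem.Str.strip (segs.getLast?.getD "")).toList =
        PySem.Chars.strip ((segs.map String.toList).getLast?.getD []) := by
      rw [PySem.Str.toList_strip, hlast]
    by_cases hcond : PySem.Str.strip (segs.getLast?.getD "") = ""
    · have hc2 : ¬ PySem.Chars.strip ((segs.map String.toList).getLast?.getD []) ≠ [] := by
        rw [← htl]
        simp only [ne_eq, String.toList_eq_nil_iff, not_not]
        exact hcond
      rw [if_neg (by simp [hcond]), if_neg hc2]
      simp [List.map_dropLast]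
    · have hc2 : PySem.Chars.strip ((segs.map String.toList).getLast?.getD []) ≠ [] := by
        rw [← htl]
        simp only [ne_eq, String.toList_eq_nil_iff]
        exact hcond
      rw [if_pos hcond, if_pos hc2]
      simp [htl, List.map_dropLast]
  rw [hA, hB]
  exact pvMainChars dil.toList hd h2 source.toList

-- ===== VERDICT (by name: the statement is the Claim_ definition above) =====
theorem safe_split_py_spec : Claim_equal_safe_split_py := by
  intro source dil _hdom hpre
  unfold Spec_safe_split_py
  exact ports_agree source dil hpre.1 hpre.2
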